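-- pv_equiv track=rewrite | github.com/kh-byeon/h_rag | online_accelerator.py | _merge_with_overlap
-- ===== SOURCE A (Python) =====
-- def _merge_with_overlap(left: str, right: str, max_overlap: int = 2000) -> str:
--     """
--     strip()을 제거하여 원본 공백을 유지한 채로 오버랩을 찾습니다.
--     """
--     l = left or ""
--     r = right or ""
--
--     if not l.strip():
--         return r
--     if not r.strip():
--         return l
--
--     max_k = min(len(l), len(r), max_overlap)
--     overlap_k = 0
--
--     # 뒤에서부터 매칭 검사
--     for k in range(max_k, 0, -1):
--         if l[-k:] == r[:k]:
--             overlap_k = k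
--             break
--
--     if overlap_k > 0:
--         return f"{l}{r[overlap_k:]}"
--
--     # 오버랩을 못 찾았을 경우 안전하게 공백 하나만 두고 병합
--     return f"{l.rstrip()} {r.lstrip()}"
-- ===== SOURCE B (Python) =====
-- def _merge_with_overlap(left: str, right: str, max_overlap: int = 2000) -> str:
--     l = left or ""
--     r = right or ""
--
--     if not l.strip():
--         return r
--     if not r.strip():
--         return l
--
--     # single forward pass over l, maintaining ALL prefix-lengths of p that
--     # currently match a suffix of the scanned part (a set-of-states automaton)
--     cap = min(len(l), len(r), max(0, max_overlap))
--     p = r[:cap]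
--     cands = [0]
--     for c in l:
--         cands = [0] + [k + 1 for k in cands if k < len(p) and p[k] == c]
--     s = max(cands)
--
--     if s > 0:
--         return f"{l}{r[s:]}"
--     return f"{l.rstrip()} {r.lstrip()}"
-- ===== Notes on version B (the rewrite author's own statement) =====
-- stated objective: alternative
-- what changed: Replaces A's descending brute-force loop over overlap lengths (re-comparing l[-k:] with r[:k] for each k) with a single left-to-right scan of l that maintains the set of all prefix-lengths of r[:cap] currently matching a suffix of the scanned text (a set-of-states matching automaton); the answer is the maximum surviving state.
import Mathlib
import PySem

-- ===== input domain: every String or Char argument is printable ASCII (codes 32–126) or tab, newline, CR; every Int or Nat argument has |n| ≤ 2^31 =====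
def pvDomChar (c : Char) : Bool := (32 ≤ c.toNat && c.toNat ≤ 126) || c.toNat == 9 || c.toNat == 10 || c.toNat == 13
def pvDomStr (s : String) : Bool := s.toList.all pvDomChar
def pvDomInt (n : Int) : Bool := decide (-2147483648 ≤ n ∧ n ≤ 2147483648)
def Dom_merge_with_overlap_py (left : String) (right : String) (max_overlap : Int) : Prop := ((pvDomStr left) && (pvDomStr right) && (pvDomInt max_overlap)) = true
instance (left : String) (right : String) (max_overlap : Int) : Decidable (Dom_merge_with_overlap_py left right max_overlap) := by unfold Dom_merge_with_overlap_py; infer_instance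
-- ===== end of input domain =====

-- ===== PORT A =====
-- B re-implements A's descending brute-force overlap search as a single forward scan of `left`
-- maintaining all matching prefix-lengths of the capped `right` prefix (set-of-states automaton);
-- objective: alternative algorithm (same worst-case cost); return values proved equal on all inputs.

-- the loop 'for k in range(max_k, 0, -1): if l[-k:] == r[:k]: overlap_k = k; break' (0 if no break)
def pvALoop (lc rc : List Char) : List Int → Int
  | [] => 0
  | k :: rest =>
    if PySem.List.slice lc (some (-k)) none = PySem.List.slice rc none (some k) then k
    else pvALoop lc rc rest

def merge_with_overlap_py (left : String) (right : String) (max_overlap : Int) : String :=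
  let l := left.toList
  let r := right.toList
  if PySem.Chars.strip l = [] then right
  else if PySem.Chars.strip r = [] then left
  else
    let max_k : Int := min (min (l.length : Int) (r.length : Int)) max_overlap
    let overlap_k : Int := pvALoop l r (PySem.List.pyRange max_k 0 (-1))
    if 0 < overlap_k then String.ofList (l ++ PySem.List.slice r (some overlap_k) none)
    else String.ofList (PySem.Chars.rstrip l ++ [' '] ++ PySem.Chars.lstrip r)

-- ===== PORT B =====
-- 'cands = [0] + [k + 1 for k in cands if k < len(p) and p[k] == c]'
def pvStep (p : List Char) (cands : List Nat) (c : Char) : List Nat :=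
  0 :: (cands.filter (fun k => decide (k < p.length) && (p[k]? == some c))).map (· + 1)

def merge_with_overlap_py_alt (left : String) (right : String) (max_overlap : Int) : String :=
  let l := left.toList
  let r := right.toList
  if PySem.Chars.strip l = [] then right
  else if PySem.Chars.strip r = [] then left
  else
    let cap : Int := min (min (l.length : Int) (r.length : Int)) (max 0 max_overlap)
    let p := PySem.List.slice r none (some cap)
    let cands := l.foldl (pvStep p) [0]
    let s : Nat := (PySem.List.max? cands (fun k => k)).getD 0
    if 0 < s then String.ofList (l ++ PySem.List.slice r (some (s : Int)) none)
    else String.ofList (PySem.Chars.rstrip l ++ [' '] ++ PySem.Chars.lstrip r)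

-- ===== PRECONDITION & SPEC =====
def Spec_merge_with_overlap_py (left : String) (right : String) (max_overlap : Int) (out : String) : Prop := out = merge_with_overlap_py_alt left right max_overlap
instance (left : String) (right : String) (max_overlap : Int) (out : String) : Decidable (Spec_merge_with_overlap_py left right max_overlap out) := by unfold Spec_merge_with_overlap_py; infer_instance

-- ===== CLAIM (what is proved, stated in full; the proofs are below) =====
def Claim_equal_merge_with_overlap_py : Prop := ∀ (left : String) (right : String) (max_overlap : Int), Dom_merge_with_overlap_py left right max_overlap → Spec_merge_with_overlap_py left right max_overlap (merge_with_overlap_py left right max_overlap)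

-- ===== LEMMAS AND PROOFS =====

-- suffix against a one-element extension
theorem pv_suffix_concat_iff (w v : List Char) (a b : Char) :
    w ++ [a] <:+ v ++ [b] ↔ w <:+ v ∧ a = b := by
  rw [← List.reverse_prefix]
  simp only [List.reverse_append, List.reverse_cons, List.reverse_nil, List.nil_append,
    List.cons_append, List.cons_prefix_cons, List.reverse_prefix]
  tauto

-- the candidate set after scanning t is exactly the set of overlap lengths valid for t
theorem pv_mem_fold (p t : List Char) (k : Nat) :
    k ∈ t.foldl (pvStep p) [0] ↔ k ≤ p.length ∧ p.take k <:+ t := by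
  induction t using List.reverseRecOn generalizing k with
  | nil =>
    simp only [List.foldl_nil, List.mem_singleton, List.suffix_nil, List.take_eq_nil_iff]
    constructor
    · rintro rfl; simp
    · rintro ⟨hk, h | h⟩
      · exact h
      · subst h; simpa using hk
  | append_singleton t c ih =>
    rw [List.foldl_append]
    simp only [List.foldl_cons, List.foldl_nil, pvStep, List.mem_cons, List.mem_map,
      List.mem_filter, Bool.and_eq_true, decide_eq_true_eq, beq_iff_eq]
    constructor
    · rintro (rfl | ⟨j, ⟨hj, hlt, hpj⟩, rfl⟩)
      · exact ⟨Nat.zero_le _, by simp⟩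
      · rcases (ih j).mp hj with ⟨hjn, hsuf⟩
        refine ⟨hlt, ?_⟩
        rw [List.take_add_one]
        have hj' : p[j]? = some p[j] := List.getElem?_eq_getElem hlt
        rw [hj']
        have : p[j] = c := by
          have := hpj; rw [hj'] at this; exact Option.some.inj this
        rw [this]
        exact (pv_suffix_concat_iff _ _ _ _).mpr ⟨hsuf, rfl⟩
    · rintro ⟨hk, hsuf⟩
      cases k with
      | zero => exact Or.inl rfl
      | succ j =>
        right
        have hlt : j < p.length := hk
        rw [List.take_add_one, List.getElem?_eq_getElem hlt] at hsuf
        rcases (pv_suffix_concat_iff _ _ _ _).mp hsuf with ⟨hsuf', hc⟩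
        exact ⟨j, ⟨(ih j).mpr ⟨Nat.le_of_lt hlt, hsuf'⟩, hlt, by rw [List.getElem?_eq_getElem hlt, hc]⟩, rfl⟩

-- the ghost form of A's loop, as a Nat recursion
def pvG (lc rc : List Char) : Nat → Nat
  | 0 => 0
  | m+1 => if lc.drop (lc.length - (m+1)) = rc.take (m+1) then m+1 else pvG lc rc m

theorem pvALoop_eq_pvG (lc rc : List Char) (m : Nat) :
    pvALoop lc rc (PySem.List.pyRange (m : Int) 0 (-1)) = (pvG lc rc m : Int) := by
  induction m with
  | zero => rw [PySem.List.pyRange_neg_one_eq_nil (by norm_num)]; rfl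
  | succ m ih =>
    rw [PySem.List.pyRange_neg_one_cons (by exact_mod_cast Nat.succ_pos m)]
    have h1 : ((m + 1 : Nat) : Int) - 1 = (m : Int) := by push_cast; ring
    simp only [pvALoop]
    rw [PySem.List.slice_from_neg_natCast lc (m+1) (Nat.succ_pos m) ,
        PySem.List.slice_to_natCast rc (m+1)]
    by_cases hc : lc.drop (lc.length - (m+1)) = rc.take (m+1)
    · rw [if_pos hc]; simp [pvG, hc]
    · rw [if_neg hc, h1, ih]; simp [pvG, hc]

theorem pvG_le (lc rc : List Char) (m : Nat) : pvG lc rc m ≤ m := by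
  induction m with
  | zero => simp [pvG]
  | succ m ih => simp only [pvG]; split <;> omega

theorem pvG_holds (lc rc : List Char) (m : Nat) :
    lc.drop (lc.length - pvG lc rc m) = rc.take (pvG lc rc m) := by
  induction m with
  | zero => simp [pvG]
  | succ m ih =>
    simp only [pvG]; split
    · assumption
    · exact ih

theorem pvG_max (lc rc : List Char) (m k : Nat) (hk : k ≤ m)
    (h : lc.drop (lc.length - k) = rc.take k) : k ≤ pvG lc rc m := by
  induction m with
  | zero => omega
  | succ m ih =>
    by_cases hc : lc.drop (lc.length - (m+1)) = rc.take (m+1)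
    · simp only [pvG, if_pos hc]; omega
    · simp only [pvG, if_neg hc]
      rcases Nat.lt_or_ge k (m+1) with h1 | h1
      · exact ih (by omega)
      · exfalso; have : k = m + 1 := by omega
        subst this; exact absurd h hc

-- bridge: for k ≤ cap ≤ rc.length, A's slice condition is the suffix condition on p = rc.take cap
theorem pv_cond_iff (lc rc : List Char) (cap k : Nat) (hk : k ≤ cap) (hR : cap ≤ rc.length) :
    lc.drop (lc.length - k) = rc.take k ↔ (rc.take cap).take k <:+ lc := by
  rw [List.take_take, min_eq_left hk]
  rw [List.suffix_iff_eq_drop]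
  have hlen : (rc.take k).length = k := by
    rw [List.length_take]; omega
  rw [hlen]
  exact ⟨fun h => h.symm, fun h => h.symm⟩

-- ===== VERDICT (by name: the statement is the Claim_ definition above) =====
theorem merge_with_overlap_py_spec : Claim_equal_merge_with_overlap_py := by
  intro left right mo _
  unfold Spec_merge_with_overlap_py merge_with_overlap_py merge_with_overlap_py_alt
  by_cases h1 : PySem.Chars.strip left.toList = []
  · simp [h1]
  by_cases h2 : PySem.Chars.strip right.toList = []
  · simp [h1, h2]
  simp only [if_neg h1, if_neg h2]
  set lc := left.toList with hlc
  set rc := right.toList with hrc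
  set maxk : Int := min (min (lc.length : Int) (rc.length : Int)) mo with hmaxk
  set capI : Int := min (min (lc.length : Int) (rc.length : Int)) (max 0 mo) with hcapI
  have hcap0 : 0 ≤ capI := by omega
  have hcapmax : capI = max 0 maxk := by omega
  have hcapR : capI ≤ (rc.length : Int) := by omega
  set cap : Nat := capI.toNat with hcap
  have hcapN : (cap : Int) = capI := Int.toNat_of_nonneg hcap0
  have hcapRN : cap ≤ rc.length := by omega
  -- B's pattern
  have hp : PySem.List.slice rc none (some capI) = rc.take cap := PySem.List.slice_to rc hcap0
  rw [hp]
  set p := rc.take cap with hpdef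
  have hplen : p.length = cap := by
    rw [hpdef, List.length_take]; omega
  -- A's loop equals the ghost
  have hA : pvALoop lc rc (PySem.List.pyRange maxk 0 (-1)) = ((pvG lc rc cap : Nat) : Int) := by
    rcases le_or_gt maxk 0 with hmk | hmk
    · rw [PySem.List.pyRange_neg_one_eq_nil hmk]
      have : cap = 0 := by omega
      rw [this]
      rfl
    · have : maxk = (cap : Int) := by omega
      rw [this]
      exact pvALoop_eq_pvG lc rc cap
  rw [hA]
  -- B's maximum
  set cands := lc.foldl (pvStep p) [0] with hcands
  have h0mem : 0 ∈ cands := by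
    rw [hcands]
    exact (pv_mem_fold p lc 0).mpr ⟨Nat.zero_le _, by simp⟩
  obtain ⟨m, hm⟩ : ∃ m, PySem.List.max? cands (fun k => k) = some m := by
    cases hmx : PySem.List.max? cands (fun k => k) with
    | none =>
      have hnil : cands = [] := (PySem.List.max?_eq_none_iff cands (fun k => k)).mp hmx
      rw [hnil] at h0mem
      simp at h0mem
    | some m => exact ⟨m, rfl⟩
  rw [hm]
  simp only [Option.getD_some]
  -- m = pvG lc rc cap
  have hmmem : m ∈ cands := PySem.List.max?_mem hm
  have hmmax : ∀ y ∈ cands, y ≤ m := fun y hy => PySem.List.max?_isMax hm y hy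
  obtain ⟨hmn, hmsuf⟩ := (pv_mem_fold p lc m).mp (hcands ▸ hmmem)
  rw [hplen] at hmn
  have hgle : pvG lc rc cap ≤ cap := pvG_le lc rc cap
  have hgcond : p.take (pvG lc rc cap) <:+ lc :=
    (pv_cond_iff lc rc cap _ hgle hcapRN).mp (pvG_holds lc rc cap)
  have hgm : pvG lc rc cap ≤ m := by
    apply hmmax
    rw [hcands]
    exact (pv_mem_fold p lc _).mpr ⟨by omega, hgcond⟩
  have hmg : m ≤ pvG lc rc cap := by
    apply pvG_max lc rc cap m hmn
    exact (pv_cond_iff lc rc cap m hmn hcapRN).mpr hmsuf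
  have hEq : pvG lc rc cap = m := le_antisymm hgm hmg
  rw [hEq]
  by_cases hpos : 0 < m
  · rw [if_pos hpos, if_pos (by exact_mod_cast hpos)]
  · rw [if_neg hpos, if_neg (by exact_mod_cast hpos)]
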